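-- pv_equiv track=rewrite | github.com/mohsen-haddadi/Stuffs | EXTRA OLD CODES/FUNCTIONS_Str_Flush_Pairs.py | River_flush_5_Cards
-- ===== SOURCE A (Python) =====
-- def s(Card) :
--     if Card in ('A c','2 c','3 c','4 c','5 c','6 c','7 c','8 c','9 c','10 c','J c','Q c','K c') :
--         return "c"
--     if Card in ('A d','2 d','3 d','4 d','5 d','6 d','7 d','8 d','9 d','10 d','J d','Q d','K d') :
--         return "d"
--     if Card in ('A h','2 h','3 h','4 h','5 h','6 h','7 h','8 h','9 h','10 h','J h','Q h','K h') :
--         return "h"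
--     if Card in ('A s','2 s','3 s','4 s','5 s','6 s','7 s','8 s','9 s','10 s','J s','Q s','K s') :
--         return "s"
--
-- def n(Card) :
--     if Card in ('2 c','2 d','2 h','2 s',2):
--         return 2
--     if Card in ('3 c','3 d','3 h','3 s',3):
--         return 3
--     if Card in ('4 c','4 d','4 h','4 s',4):
--         return 4
--     if Card in ('5 c','5 d','5 h','5 s',5):
--         return 5
--     if Card in ('6 c','6 d','6 h','6 s',6):
--         return 6
--     if Card in ('7 c','7 d','7 h','7 s',7):
--         return 7
--     if Card in ('8 c','8 d','8 h','8 s',8):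
--         return 8
--     if Card in ('9 c','9 d','9 h','9 s',9):
--         return 9
--     if Card in ('10 c','10 d','10 h','10 s',10):
--         return 10
--     if Card in ('J c','J d','J h','J s',11):
--         return 11
--     if Card in ('Q c','Q d','Q h','Q s',12):
--         return 12
--     if Card in ('K c','K d','K h','K s',13):
--         return 13
--     if Card in ('A c','A d','A h','A s',14):
--         return 14
--
-- def River_flush_5_Cards( Card_1th, Card_2th, Card_3th, Card_4th, Card_5th ):
--
--     if s(Card_1th) == s(Card_2th) == s(Card_3th) == s(Card_4th) == s(Card_5th) :
--
--         max2 = 14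
--         while True :
--             if max2 not in ( n(Card_1th), n(Card_2th), n(Card_3th), n(Card_4th), n(Card_5th) ) :
--                 break
--             else :
--                 max2 = max2 - 1
--
--         if max2 == 14 : max2='A'
--         if max2 == 13 : max2='K'
--         if max2 == 12 : max2='Q'
--         if max2 == 11 : max2='J'
--         return ("%s %s" %(max2,s(Card_1th)) )
-- ===== SOURCE B (Python) =====
-- SUITS = ('c', 'd', 'h', 's')
-- RANKS = ('2', '3', '4', '5', '6', '7', '8', '9', '10', 'J', 'Q', 'K', 'A')
-- LABELS = {14: 'A', 13: 'K', 12: 'Q', 11: 'J'}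
--
-- def parse(card):
--     # (rank value, suit letter) of a valid card string; (None, None) otherwise
--     for su in SUITS:
--         for i, rk in enumerate(RANKS):
--             if card == rk + ' ' + su:
--                 return i + 2, su
--     return None, None
--
-- def River_flush_5_Cards(Card_1th, Card_2th, Card_3th, Card_4th, Card_5th):
--     parsed = [parse(c) for c in (Card_1th, Card_2th, Card_3th, Card_4th, Card_5th)]
--     if len({su for _, su in parsed}) == 1:
--         present = {r for r, _ in parsed}
--         ans = max(set(range(2, 15)) - present)
--         return "%s %s" % (LABELS.get(ans, str(ans)), parsed[0][1])
-- ===== Notes on version B (the rewrite author's own statement) =====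
-- stated objective: alternative
-- what changed: Replaces A's hand-written 4-suit and 13-rank membership chains, descending while-loop probe and sequential relabel ifs by a single generate-and-test parse of each card against the 52-card deck product, a suit-set cardinality check, max(set(range(2,15)) - present_ranks), and a dict lookup for the letter labels.
import Mathlib
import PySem

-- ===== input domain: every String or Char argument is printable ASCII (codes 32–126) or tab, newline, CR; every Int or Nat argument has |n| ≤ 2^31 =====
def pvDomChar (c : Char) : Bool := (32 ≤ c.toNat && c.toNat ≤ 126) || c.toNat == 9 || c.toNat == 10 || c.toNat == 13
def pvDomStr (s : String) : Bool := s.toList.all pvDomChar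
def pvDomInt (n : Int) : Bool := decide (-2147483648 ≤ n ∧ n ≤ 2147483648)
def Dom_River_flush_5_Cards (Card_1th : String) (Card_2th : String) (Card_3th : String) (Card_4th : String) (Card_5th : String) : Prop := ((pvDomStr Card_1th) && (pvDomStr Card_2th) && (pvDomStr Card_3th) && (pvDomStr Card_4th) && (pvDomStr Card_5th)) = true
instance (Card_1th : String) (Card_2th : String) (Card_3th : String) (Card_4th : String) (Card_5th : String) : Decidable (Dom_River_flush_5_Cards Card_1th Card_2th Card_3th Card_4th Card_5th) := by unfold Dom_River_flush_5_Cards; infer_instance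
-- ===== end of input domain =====

-- B replaces A's 4+13 hand-written membership chains, descending while-loop and sequential
-- relabel ifs by one generate-and-test parse over the 52-card deck, a suit-set cardinality
-- check, max over the set-complement of the present ranks, and a dict label lookup
-- (alternative decomposition, same cost).


-- ===== PORT A =====
-- module helper s(Card): suit of a valid card string, None otherwise
def pyS (Card : String) : Option String :=
  if Card ∈ ["A c","2 c","3 c","4 c","5 c","6 c","7 c","8 c","9 c","10 c","J c","Q c","K c"] then some "c"
  else if Card ∈ ["A d","2 d","3 d","4 d","5 d","6 d","7 d","8 d","9 d","10 d","J d","Q d","K d"] then some "d"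
  else if Card ∈ ["A h","2 h","3 h","4 h","5 h","6 h","7 h","8 h","9 h","10 h","J h","Q h","K h"] then some "h"
  else if Card ∈ ["A s","2 s","3 s","4 s","5 s","6 s","7 s","8 s","9 s","10 s","J s","Q s","K s"] then some "s"
  else none

-- module helper n(Card): rank of a valid card string, None otherwise (the int alternatives
-- of the Python tuples cannot occur: the argument is a string here)
def pyN (Card : String) : Option Int :=
  if Card ∈ ["2 c","2 d","2 h","2 s"] then some 2
  else if Card ∈ ["3 c","3 d","3 h","3 s"] then some 3
  else if Card ∈ ["4 c","4 d","4 h","4 s"] then some 4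
  else if Card ∈ ["5 c","5 d","5 h","5 s"] then some 5
  else if Card ∈ ["6 c","6 d","6 h","6 s"] then some 6
  else if Card ∈ ["7 c","7 d","7 h","7 s"] then some 7
  else if Card ∈ ["8 c","8 d","8 h","8 s"] then some 8
  else if Card ∈ ["9 c","9 d","9 h","9 s"] then some 9
  else if Card ∈ ["10 c","10 d","10 h","10 s"] then some 10
  else if Card ∈ ["J c","J d","J h","J s"] then some 11
  else if Card ∈ ["Q c","Q d","Q h","Q s"] then some 12
  else if Card ∈ ["K c","K d","K h","K s"] then some 13
  else if Card ∈ ["A c","A d","A h","A s"] then some 14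
  else none

-- "%s" of a value that may be Python None ("None")
def optShow (o : Option String) : String := match o with | some t => t | none => "None"

-- A's 'while True: if max2 not in (...) : break else: max2 -= 1'.  Fuel only makes the
-- loop total; 13 steps never run out: at most 5 of the probed values are in the 5-tuple.
def aLoop (S : List (Option Int)) (max2 : Int) : Nat → Int
  | 0 => max2
  | f + 1 => if some max2 ∈ S then aLoop S (max2 - 1) f else max2

def River_flush_5_Cards (Card_1th : String) (Card_2th : String) (Card_3th : String) (Card_4th : String) (Card_5th : String) : Option String :=
  if pyS Card_1th == pyS Card_2th && pyS Card_2th == pyS Card_3th && pyS Card_3th == pyS Card_4th && pyS Card_4th == pyS Card_5th then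
    let max2 := aLoop [pyN Card_1th, pyN Card_2th, pyN Card_3th, pyN Card_4th, pyN Card_5th] 14 13
    let label := if max2 == 14 then "A" else if max2 == 13 then "K" else if max2 == 12 then "Q" else if max2 == 11 then "J" else PySem.Int.toStr max2
    some (label ++ " " ++ optShow (pyS Card_1th))
  else none

-- ===== PORT B =====
-- Source B module constants SUITS / RANKS / LABELS
def bSuits : List String := ["c", "d", "h", "s"]
def bRanks : List String := ["2", "3", "4", "5", "6", "7", "8", "9", "10", "J", "Q", "K", "A"]
def bLabels : PySem.Dict Int String := PySem.Dict.ofList [((14 : Int), "A"), (13, "K"), (12, "Q"), (11, "J")]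

-- the inner 'for i, rk in enumerate(RANKS): if card == rk + ' ' + su: return i + 2, su'
def bParseInner (card su : String) : List (Int × String) → Option (Option Int × Option String)
  | [] => none
  | (i, rk) :: rest =>
      if card == rk ++ " " ++ su then some (some (i + 2), some su) else bParseInner card su rest

-- the outer 'for su in SUITS: …' with the trailing 'return None, None'
def bParseGo (card : String) : List String → Option Int × Option String
  | [] => (none, none)
  | su :: rest =>
      match bParseInner card su (PySem.List.enumerate bRanks 0) with
      | some res => res
      | none => bParseGo card rest

def bParse (card : String) : Option Int × Option String := bParseGo card bSuits

def River_flush_5_Cards_alt (Card_1th : String) (Card_2th : String) (Card_3th : String) (Card_4th : String) (Card_5th : String) : Option String :=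
  let p1 := bParse Card_1th
  let parsed := [p1, bParse Card_2th, bParse Card_3th, bParse Card_4th, bParse Card_5th]
  if PySem.Set.len (PySem.Set.ofList (parsed.map (·.2))) == 1 then
    -- {r for r, _ in parsed if r is not None}
    let present := PySem.Set.ofList (parsed.filterMap (·.1))
    -- max(set(range(2, 15)) - present); the complement of ≤ 5 ranks in 13 is nonempty,
    -- so Python's max never raises and the none branch is unreachable
    match PySem.List.max? (PySem.Set.diff (PySem.Set.ofList (PySem.List.pyRange 2 15 1)) present) (fun x => x) with
    | none => none
    | some ans => some (PySem.Dict.getD bLabels ans (PySem.Int.toStr ans) ++ " " ++ optShow p1.2)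
  else none

-- ===== PRECONDITION & SPEC =====
def Spec_River_flush_5_Cards (Card_1th : String) (Card_2th : String) (Card_3th : String) (Card_4th : String) (Card_5th : String) (out : Option String) : Prop := out = River_flush_5_Cards_alt Card_1th Card_2th Card_3th Card_4th Card_5th
instance (Card_1th : String) (Card_2th : String) (Card_3th : String) (Card_4th : String) (Card_5th : String) (out : Option String) : Decidable (Spec_River_flush_5_Cards Card_1th Card_2th Card_3th Card_4th Card_5th out) := by unfold Spec_River_flush_5_Cards; infer_instance

-- ===== CLAIM (what is proved, stated in full; the proofs are below) =====
def Claim_equal_River_flush_5_Cards : Prop := ∀ (Card_1th : String) (Card_2th : String) (Card_3th : String) (Card_4th : String) (Card_5th : String), Dom_River_flush_5_Cards Card_1th Card_2th Card_3th Card_4th Card_5th → Spec_River_flush_5_Cards Card_1th Card_2th Card_3th Card_4th Card_5th (River_flush_5_Cards Card_1th Card_2th Card_3th Card_4th Card_5th)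

-- ===== LEMMAS AND PROOFS =====

-- the 52 card strings (the generate-and-test space of B's parse, = the strings A's tables accept)
def allCards : List String := ["2 c", "3 c", "4 c", "5 c", "6 c", "7 c", "8 c", "9 c", "10 c", "J c", "Q c", "K c", "A c", "2 d", "3 d", "4 d", "5 d", "6 d", "7 d", "8 d", "9 d", "10 d", "J d", "Q d", "K d", "A d", "2 h", "3 h", "4 h", "5 h", "6 h", "7 h", "8 h", "9 h", "10 h", "J h", "Q h", "K h", "A h", "2 s", "3 s", "4 s", "5 s", "6 s", "7 s", "8 s", "9 s", "10 s", "J s", "Q s", "K s", "A s"]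

-- B's parse computes exactly A's helpers n and s.
theorem parse_eq (card : String) : bParse card = (pyN card, pyS card) := by
  by_cases h : card ∈ allCards
  · fin_cases h <;> rfl
  · have hne : ∀ l : String, l ∈ allCards → ¬ card = l := fun l hl hc => h (hc ▸ hl)
    have hS : pyS card = none := by
      unfold pyS
      rw [if_neg (fun hc => h (show card ∈ allCards by fin_cases hc <;> decide)),
          if_neg (fun hc => h (show card ∈ allCards by fin_cases hc <;> decide)),
          if_neg (fun hc => h (show card ∈ allCards by fin_cases hc <;> decide)),
          if_neg (fun hc => h (show card ∈ allCards by fin_cases hc <;> decide))]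
    have hN : pyN card = none := by
      unfold pyN
      rw [if_neg (fun hc => h (show card ∈ allCards by fin_cases hc <;> decide)),
          if_neg (fun hc => h (show card ∈ allCards by fin_cases hc <;> decide)),
          if_neg (fun hc => h (show card ∈ allCards by fin_cases hc <;> decide)),
          if_neg (fun hc => h (show card ∈ allCards by fin_cases hc <;> decide)),
          if_neg (fun hc => h (show card ∈ allCards by fin_cases hc <;> decide)),
          if_neg (fun hc => h (show card ∈ allCards by fin_cases hc <;> decide)),
          if_neg (fun hc => h (show card ∈ allCards by fin_cases hc <;> decide)),
          if_neg (fun hc => h (show card ∈ allCards by fin_cases hc <;> decide)),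
          if_neg (fun hc => h (show card ∈ allCards by fin_cases hc <;> decide)),
          if_neg (fun hc => h (show card ∈ allCards by fin_cases hc <;> decide)),
          if_neg (fun hc => h (show card ∈ allCards by fin_cases hc <;> decide)),
          if_neg (fun hc => h (show card ∈ allCards by fin_cases hc <;> decide)),
          if_neg (fun hc => h (show card ∈ allCards by fin_cases hc <;> decide))]
    have hB : bParse card = (none, none) := by
      have e01 : (card = "2" ++ " " ++ "c") = False := eq_false (hne ("2" ++ " " ++ "c") (by decide))
      have e02 : (card = "3" ++ " " ++ "c") = False := eq_false (hne ("3" ++ " " ++ "c") (by decide))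
      have e03 : (card = "4" ++ " " ++ "c") = False := eq_false (hne ("4" ++ " " ++ "c") (by decide))
      have e04 : (card = "5" ++ " " ++ "c") = False := eq_false (hne ("5" ++ " " ++ "c") (by decide))
      have e05 : (card = "6" ++ " " ++ "c") = False := eq_false (hne ("6" ++ " " ++ "c") (by decide))
      have e06 : (card = "7" ++ " " ++ "c") = False := eq_false (hne ("7" ++ " " ++ "c") (by decide))
      have e07 : (card = "8" ++ " " ++ "c") = False := eq_false (hne ("8" ++ " " ++ "c") (by decide))
      have e08 : (card = "9" ++ " " ++ "c") = False := eq_false (hne ("9" ++ " " ++ "c") (by decide))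
      have e09 : (card = "10" ++ " " ++ "c") = False := eq_false (hne ("10" ++ " " ++ "c") (by decide))
      have e10 : (card = "J" ++ " " ++ "c") = False := eq_false (hne ("J" ++ " " ++ "c") (by decide))
      have e11 : (card = "Q" ++ " " ++ "c") = False := eq_false (hne ("Q" ++ " " ++ "c") (by decide))
      have e12 : (card = "K" ++ " " ++ "c") = False := eq_false (hne ("K" ++ " " ++ "c") (by decide))
      have e13 : (card = "A" ++ " " ++ "c") = False := eq_false (hne ("A" ++ " " ++ "c") (by decide))
      have e14 : (card = "2" ++ " " ++ "d") = False := eq_false (hne ("2" ++ " " ++ "d") (by decide))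
      have e15 : (card = "3" ++ " " ++ "d") = False := eq_false (hne ("3" ++ " " ++ "d") (by decide))
      have e16 : (card = "4" ++ " " ++ "d") = False := eq_false (hne ("4" ++ " " ++ "d") (by decide))
      have e17 : (card = "5" ++ " " ++ "d") = False := eq_false (hne ("5" ++ " " ++ "d") (by decide))
      have e18 : (card = "6" ++ " " ++ "d") = False := eq_false (hne ("6" ++ " " ++ "d") (by decide))
      have e19 : (card = "7" ++ " " ++ "d") = False := eq_false (hne ("7" ++ " " ++ "d") (by decide))
      have e20 : (card = "8" ++ " " ++ "d") = False := eq_false (hne ("8" ++ " " ++ "d") (by decide))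
      have e21 : (card = "9" ++ " " ++ "d") = False := eq_false (hne ("9" ++ " " ++ "d") (by decide))
      have e22 : (card = "10" ++ " " ++ "d") = False := eq_false (hne ("10" ++ " " ++ "d") (by decide))
      have e23 : (card = "J" ++ " " ++ "d") = False := eq_false (hne ("J" ++ " " ++ "d") (by decide))
      have e24 : (card = "Q" ++ " " ++ "d") = False := eq_false (hne ("Q" ++ " " ++ "d") (by decide))
      have e25 : (card = "K" ++ " " ++ "d") = False := eq_false (hne ("K" ++ " " ++ "d") (by decide))
      have e26 : (card = "A" ++ " " ++ "d") = False := eq_false (hne ("A" ++ " " ++ "d") (by decide))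
      have e27 : (card = "2" ++ " " ++ "h") = False := eq_false (hne ("2" ++ " " ++ "h") (by decide))
      have e28 : (card = "3" ++ " " ++ "h") = False := eq_false (hne ("3" ++ " " ++ "h") (by decide))
      have e29 : (card = "4" ++ " " ++ "h") = False := eq_false (hne ("4" ++ " " ++ "h") (by decide))
      have e30 : (card = "5" ++ " " ++ "h") = False := eq_false (hne ("5" ++ " " ++ "h") (by decide))
      have e31 : (card = "6" ++ " " ++ "h") = False := eq_false (hne ("6" ++ " " ++ "h") (by decide))
      have e32 : (card = "7" ++ " " ++ "h") = False := eq_false (hne ("7" ++ " " ++ "h") (by decide))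
      have e33 : (card = "8" ++ " " ++ "h") = False := eq_false (hne ("8" ++ " " ++ "h") (by decide))
      have e34 : (card = "9" ++ " " ++ "h") = False := eq_false (hne ("9" ++ " " ++ "h") (by decide))
      have e35 : (card = "10" ++ " " ++ "h") = False := eq_false (hne ("10" ++ " " ++ "h") (by decide))
      have e36 : (card = "J" ++ " " ++ "h") = False := eq_false (hne ("J" ++ " " ++ "h") (by decide))
      have e37 : (card = "Q" ++ " " ++ "h") = False := eq_false (hne ("Q" ++ " " ++ "h") (by decide))
      have e38 : (card = "K" ++ " " ++ "h") = False := eq_false (hne ("K" ++ " " ++ "h") (by decide))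
      have e39 : (card = "A" ++ " " ++ "h") = False := eq_false (hne ("A" ++ " " ++ "h") (by decide))
      have e40 : (card = "2" ++ " " ++ "s") = False := eq_false (hne ("2" ++ " " ++ "s") (by decide))
      have e41 : (card = "3" ++ " " ++ "s") = False := eq_false (hne ("3" ++ " " ++ "s") (by decide))
      have e42 : (card = "4" ++ " " ++ "s") = False := eq_false (hne ("4" ++ " " ++ "s") (by decide))
      have e43 : (card = "5" ++ " " ++ "s") = False := eq_false (hne ("5" ++ " " ++ "s") (by decide))
      have e44 : (card = "6" ++ " " ++ "s") = False := eq_false (hne ("6" ++ " " ++ "s") (by decide))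
      have e45 : (card = "7" ++ " " ++ "s") = False := eq_false (hne ("7" ++ " " ++ "s") (by decide))
      have e46 : (card = "8" ++ " " ++ "s") = False := eq_false (hne ("8" ++ " " ++ "s") (by decide))
      have e47 : (card = "9" ++ " " ++ "s") = False := eq_false (hne ("9" ++ " " ++ "s") (by decide))
      have e48 : (card = "10" ++ " " ++ "s") = False := eq_false (hne ("10" ++ " " ++ "s") (by decide))
      have e49 : (card = "J" ++ " " ++ "s") = False := eq_false (hne ("J" ++ " " ++ "s") (by decide))
      have e50 : (card = "Q" ++ " " ++ "s") = False := eq_false (hne ("Q" ++ " " ++ "s") (by decide))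
      have e51 : (card = "K" ++ " " ++ "s") = False := eq_false (hne ("K" ++ " " ++ "s") (by decide))
      have e52 : (card = "A" ++ " " ++ "s") = False := eq_false (hne ("A" ++ " " ++ "s") (by decide))
      simp only [bParse, bSuits, bParseGo, bRanks, PySem.List.enumerate_cons,
        PySem.List.enumerate_nil, bParseInner, beq_iff_eq,
        e01, e02, e03, e04, e05, e06, e07, e08, e09, e10, e11, e12, e13, e14, e15, e16, e17, e18, e19, e20, e21, e22, e23, e24, e25, e26, e27, e28, e29, e30, e31, e32, e33, e34, e35, e36, e37, e38, e39, e40, e41, e42, e43, e44, e45, e46, e47, e48, e49, e50, e51, e52,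
        if_false]
    rw [hB, hS, hN]

-- a 5-element list of optional ranks misses one of some 9 .. some 14 (pigeonhole)
theorem pigeon (S : List (Option Int)) (h5 : S.length = 5) :
    ∃ r : Int, 9 ≤ r ∧ r ≤ 14 ∧ some r ∉ S := by
  by_contra h
  push Not at h
  have hsub : ([some 9, some 10, some 11, some 12, some 13, some 14] : List (Option Int)) ⊆ S := by
    intro x hx
    simp only [List.mem_cons, List.not_mem_nil, or_false] at hx
    rcases hx with rfl | rfl | rfl | rfl | rfl | rfl
    · exact h 9 (by norm_num) (by norm_num)
    · exact h 10 (by norm_num) (by norm_num)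
    · exact h 11 (by norm_num) (by norm_num)
    · exact h 12 (by norm_num) (by norm_num)
    · exact h 13 (by norm_num) (by norm_num)
    · exact h 14 (by norm_num) (by norm_num)
  have hcard : ([some 9, some 10, some 11, some 12, some 13, some 14] : List (Option Int)).toFinset.card ≤ S.toFinset.card :=
    Finset.card_le_card (fun x hx => List.mem_toFinset.mpr (hsub (List.mem_toFinset.mp hx)))
  have h6 : ([some 9, some 10, some 11, some 12, some 13, some 14] : List (Option Int)).toFinset.card = 6 := by decide
  have := S.toFinset_card_le
  omega

-- characterisation of A's loop: it stops at an absent value with everything above it (≤ m) present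
theorem aLoop_spec (f : Nat) : ∀ (m : Int) (S : List (Option Int)),
    (∃ r : Int, m - f ≤ r ∧ r ≤ m ∧ some r ∉ S) →
    some (aLoop S m f) ∉ S ∧ aLoop S m f ≤ m ∧
      ∀ x : Int, aLoop S m f < x → x ≤ m → some x ∈ S := by
  induction f with
  | zero =>
    intro m S ⟨r, h1, h2, h3⟩
    have : r = m := by omega
    subst this
    refine ⟨by simpa [aLoop] using h3, by simp [aLoop], ?_⟩
    intro x hx hx'
    simp only [aLoop] at hx
    exact absurd (lt_of_lt_of_le hx hx') (by omega)
  | succ f ih =>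
    intro m S ⟨r, h1, h2, h3⟩
    by_cases hm : some m ∈ S
    · have hr : r ≠ m := fun h => h3 (h ▸ hm)
      obtain ⟨ha, hb, hc⟩ := ih (m - 1) S ⟨r, by omega, by omega, h3⟩
      refine ⟨by simpa [aLoop, hm] using ha, by simp [aLoop, hm]; omega, ?_⟩
      intro x hx hx'
      simp only [aLoop, if_pos hm] at hx
      rcases eq_or_lt_of_le hx' with h | h
      · exact h ▸ hm
      · exact hc x hx (by omega)
    · refine ⟨by simp [aLoop, hm], by simp [aLoop, hm], ?_⟩
      intro x hx hx'
      simp only [aLoop, if_neg hm] at hx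
      exact absurd (lt_of_lt_of_le hx hx') (by omega)

-- B's max over the set difference equals A's loop result
theorem maxDiff (S : List (Option Int)) (h5 : S.length = 5) (P : List Int)
    (hP : ∀ r : Int, r ∈ P ↔ some r ∈ S) :
    PySem.List.max? (PySem.Set.diff (PySem.Set.ofList (PySem.List.pyRange 2 15 1)) (PySem.Set.ofList P)) (fun x => x)
      = some (aLoop S 14 13) ∧ 9 ≤ aLoop S 14 13 ∧ aLoop S 14 13 ≤ 14 := by
  obtain ⟨r, hr9, hr14, hrS⟩ := pigeon S h5
  obtain ⟨ha, hb, hc⟩ := aLoop_spec 13 14 S ⟨r, by omega, hr14, hrS⟩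
  set out := aLoop S 14 13 with hout
  have hge : 9 ≤ out := by
    by_contra hlt
    exact hrS (hc r (by omega) hr14)
  have hmemD : ∀ x : Int, x ∈ PySem.Set.diff (PySem.Set.ofList (PySem.List.pyRange 2 15 1)) (PySem.Set.ofList P) ↔ (2 ≤ x ∧ x < 15) ∧ some x ∉ S := by
    intro x
    rw [PySem.Set.mem_diff, PySem.Set.mem_ofList, PySem.Set.mem_ofList, PySem.List.mem_pyRange_one, hP]
  have hmemL : out ∈ PySem.Set.diff (PySem.Set.ofList (PySem.List.pyRange 2 15 1)) (PySem.Set.ofList P) :=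
    (hmemD out).mpr ⟨⟨by omega, by omega⟩, ha⟩
  obtain ⟨m, hm⟩ : ∃ m, PySem.List.max? (PySem.Set.diff (PySem.Set.ofList (PySem.List.pyRange 2 15 1)) (PySem.Set.ofList P)) (fun x => x) = some m := by
    cases hq : PySem.List.max? (PySem.Set.diff (PySem.Set.ofList (PySem.List.pyRange 2 15 1)) (PySem.Set.ofList P)) (fun x => x) with
    | none => exact absurd ((PySem.List.max?_eq_none_iff _ _).mp hq) (List.ne_nil_of_mem hmemL)
    | some m => exact ⟨m, rfl⟩
  have hmmem := PySem.List.max?_mem hm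
  have hmax := PySem.List.max?_isMax hm out hmemL
  have hmle : m ≤ out := by
    obtain ⟨⟨hm2, hm15⟩, habs⟩ := (hmemD m).mp hmmem
    by_contra hgt
    exact habs (hc m (by omega) (by omega))
  have : m = out := le_antisymm hmle hmax
  exact ⟨this ▸ hm, hge, hb⟩

-- a set containing two distinct elements does not have length 1
theorem set_len_ne_one {α : Type} [BEq α] [LawfulBEq α] (l : List α) (x y : α)
    (hx : x ∈ l) (hy : y ∈ l) (hxy : x ≠ y) : PySem.Set.len (PySem.Set.ofList l) ≠ 1 := by
  intro h1
  have h1' : (PySem.Set.ofList l).length = 1 := by simpa [PySem.Set.len] using h1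
  obtain ⟨z, hz⟩ := List.length_eq_one_iff.mp h1'
  have hx' : x ∈ PySem.Set.ofList l := (PySem.Set.mem_ofList l x).mpr hx
  have hy' : y ∈ PySem.Set.ofList l := (PySem.Set.mem_ofList l y).mpr hy
  rw [hz] at hx' hy'
  simp only [List.mem_singleton] at hx' hy'
  exact hxy (hx'.trans hy'.symm)

-- B's 'len(suit set) == 1' is A's chained suit equality
theorem setLen1 (a b c d e : Option String) :
    (PySem.Set.len (PySem.Set.ofList [a, b, c, d, e]) == 1)
      = (a == b && b == c && c == d && d == e) := by
  by_cases hab : a = b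
  · by_cases hbc : b = c
    · by_cases hcd : c = d
      · by_cases hde : d = e
        · subst hab hbc hcd hde
          simp [PySem.Set.ofList, PySem.Set.add, PySem.Set.len, PySem.Set.empty, PySem.Set.contains]
        · have hL := set_len_ne_one [a, b, c, d, e] d e (by simp) (by simp) hde
          exact (beq_eq_false_iff_ne.mpr hL).trans (show (a == b && b == c && c == d && d == e) = false by simp [hde]).symm
      · have hL := set_len_ne_one [a, b, c, d, e] c d (by simp) (by simp) hcd
        exact (beq_eq_false_iff_ne.mpr hL).trans (show (a == b && b == c && c == d && d == e) = false by simp [hcd]).symm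
    · have hL := set_len_ne_one [a, b, c, d, e] b c (by simp) (by simp) hbc
      exact (beq_eq_false_iff_ne.mpr hL).trans (show (a == b && b == c && c == d && d == e) = false by simp [hbc]).symm
  · have hL := set_len_ne_one [a, b, c, d, e] a b (by simp) (by simp) hab
    exact (beq_eq_false_iff_ne.mpr hL).trans (show (a == b && b == c && c == d && d == e) = false by simp [hab]).symm

-- the two label computations agree on 9 .. 14
theorem label_eq (v : Int) (h9 : 9 ≤ v) (h14 : v ≤ 14) :
    (if v == 14 then "A" else if v == 13 then "K" else if v == 12 then "Q" else if v == 11 then "J" else PySem.Int.toStr v)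
      = PySem.Dict.getD bLabels v (PySem.Int.toStr v) := by
  interval_cases v <;> decide

-- ===== VERDICT (by name: the statement is the Claim_ definition above) =====
theorem River_flush_5_Cards_spec : Claim_equal_River_flush_5_Cards := by
  intro c1 c2 c3 c4 c5 _
  unfold Spec_River_flush_5_Cards River_flush_5_Cards River_flush_5_Cards_alt
  simp only [parse_eq, List.map_cons, List.map_nil, setLen1]
  by_cases h : (pyS c1 == pyS c2 && pyS c2 == pyS c3 && pyS c3 == pyS c4 && pyS c4 == pyS c5) = true
  · rw [if_pos h, if_pos h]
    have hP : ∀ r : Int, r ∈ ([(pyN c1, pyS c1), (pyN c2, pyS c2), (pyN c3, pyS c3), (pyN c4, pyS c4), (pyN c5, pyS c5)].filterMap (·.1)) ↔ some r ∈ [pyN c1, pyN c2, pyN c3, pyN c4, pyN c5] := by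
      intro r
      simp only [List.mem_filterMap, List.mem_cons, List.not_mem_nil, or_false]
      constructor
      · rintro ⟨p, hp, hp1⟩
        rcases hp with rfl | rfl | rfl | rfl | rfl <;> simp_all
      · rintro (hr | hr | hr | hr | hr)
        · exact ⟨(pyN c1, pyS c1), by tauto, hr.symm⟩
        · exact ⟨(pyN c2, pyS c2), by tauto, hr.symm⟩
        · exact ⟨(pyN c3, pyS c3), by tauto, hr.symm⟩
        · exact ⟨(pyN c4, pyS c4), by tauto, hr.symm⟩
        · exact ⟨(pyN c5, pyS c5), by tauto, hr.symm⟩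
    obtain ⟨hmax, h9, h14⟩ := maxDiff [pyN c1, pyN c2, pyN c3, pyN c4, pyN c5] rfl _ hP
    simp only [List.filterMap_cons] at hmax ⊢
    rw [hmax]
    rw [label_eq _ h9 h14]
  · rw [if_neg h, if_neg h]
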